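-- pv_equiv track=rewrite | github.com/haleytalton/haleytalton.github.io | Prefix to Postfix_python/proj2/proj2.py | valid_char
-- ===== SOURCE A (Python) =====
-- def valid_char(expression):
--     count = 0
--     for x in expression:
--         if str(x) in ['+', '-', '*', '/', '$', '\n'] or ('a' <= str(x) <= "z") or ('A' <= str(x) <= "Z"):
--             count += 1
--     if count == len(expression):
--         return True
--     else:
--         return False
-- ===== SOURCE B (Python) =====
-- def valid_char(expression):
--     valid = set('+-*/$\nabcdefghijklmnopqrstuvwxyzABCDEFGHIJKLMNOPQRSTUVWXYZ')
--     return set(expression) <= valid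
-- ===== Notes on version B (the rewrite author's own statement) =====
-- stated objective: idiomatic
-- what changed: Replaces the per-character count-and-compare loop with building the set of distinct characters once and testing it as a subset of the fixed valid-character set.
import Mathlib
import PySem

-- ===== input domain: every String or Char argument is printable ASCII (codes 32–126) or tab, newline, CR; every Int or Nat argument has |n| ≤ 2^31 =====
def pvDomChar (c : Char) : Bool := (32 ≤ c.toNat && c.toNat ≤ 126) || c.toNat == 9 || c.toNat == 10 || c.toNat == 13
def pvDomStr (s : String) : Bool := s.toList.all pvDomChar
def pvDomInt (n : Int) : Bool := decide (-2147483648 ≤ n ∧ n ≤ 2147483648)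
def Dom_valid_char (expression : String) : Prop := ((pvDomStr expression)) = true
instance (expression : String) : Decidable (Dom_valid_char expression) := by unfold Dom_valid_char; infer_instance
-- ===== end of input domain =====

-- B replaces A's count-matches-then-compare-to-length loop by a subset test of the
-- distinct characters against the fixed valid-character set (idiomatic; same cost).

-- ===== PORT A =====
-- the if-condition of A's loop, as a helper predicate
def vcCond (x : Char) : Bool :=
  (['+', '-', '*', '/', '$', '\n'].contains x) || ('a' ≤ x && x ≤ 'z') || ('A' ≤ x && x ≤ 'Z')

def valid_char (expression : String) : Bool :=
  let count : Int :=
    expression.toList.foldl (fun count x => if vcCond x then count + 1 else count) 0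
  if count = PySem.Str.len expression then true else false

-- ===== PORT B =====
def vcValid : PySem.Set Char :=
  PySem.Set.ofList "+-*/$\nabcdefghijklmnopqrstuvwxyzABCDEFGHIJKLMNOPQRSTUVWXYZ".toList

def valid_char_alt (expression : String) : Bool :=
  PySem.Set.issubset (PySem.Set.ofList expression.toList) vcValid

-- ===== PRECONDITION & SPEC =====
def Spec_valid_char (expression : String) (out : Bool) : Prop := out = valid_char_alt expression
instance (expression : String) (out : Bool) : Decidable (Spec_valid_char expression out) := by unfold Spec_valid_char; infer_instance

-- ===== CLAIM (what is proved, stated in full; the proofs are below) =====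
def Claim_equal_valid_char : Prop := ∀ (expression : String), Dom_valid_char expression → Spec_valid_char expression (valid_char expression)

-- ===== LEMMAS AND PROOFS =====

lemma vc_foldl_count (l : List Char) (n : Int) :
    l.foldl (fun count x => if vcCond x then count + 1 else count) n
      = n + (l.countP vcCond : Int) := by
  induction l generalizing n with
  | nil => simp
  | cons x xs ih =>
    simp only [List.foldl_cons, List.countP_cons, ih]
    by_cases h : vcCond x = true
    · simp [h]
      ring
    · simp [h]

-- the per-character bridge, checked on the bounded domain
set_option maxRecDepth 4000 in
lemma vc_cond_iff_mem (x : Char) (hx : pvDomChar x = true) :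
    vcCond x = true ↔ x ∈ vcValid := by
  have key : ∀ n : Nat, n < 127 →
      (vcCond (Char.ofNat n) = true ↔ (Char.ofNat n) ∈ vcValid) := by decide
  have hlt : x.toNat < 127 := by
    simp only [pvDomChar, Bool.or_eq_true, Bool.and_eq_true, decide_eq_true_eq,
      beq_iff_eq] at hx
    omega
  have := key x.toNat hlt
  rwa [Char.ofNat_toNat] at this

theorem valid_char_spec : Claim_equal_valid_char := by
  intro e hd
  unfold Spec_valid_char valid_char valid_char_alt
  have hdom : ∀ x ∈ e.toList, pvDomChar x = true := by
    unfold Dom_valid_char pvDomStr at hd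
    exact List.all_eq_true.1 hd
  simp only [vc_foldl_count, zero_add, PySem.Str.len]
  by_cases hB : PySem.Set.issubset (PySem.Set.ofList e.toList) vcValid = true
  · rw [hB]
    have heq : e.toList.countP vcCond = e.toList.length :=
      List.countP_eq_length.2 (fun x hx =>
        (vc_cond_iff_mem x (hdom x hx)).2
          ((PySem.Set.issubset_iff _ _).1 hB x ((PySem.Set.mem_ofList _ _).2 hx)))
    simp [heq]
  · rw [Bool.not_eq_true] at hB
    rw [hB]
    -- B says false: some character is outside vcValid, so A's count is short
    have hnot : ¬ ∀ x ∈ e.toList, x ∈ vcValid := by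
      intro h
      rw [(PySem.Set.issubset_iff _ _).2
        (fun x hx => h x ((PySem.Set.mem_ofList _ _).1 hx))] at hB
      cases hB
    push Not at hnot
    obtain ⟨x, hxmem, hxnot⟩ := hnot
    have hcond : vcCond x = false := by
      cases h : vcCond x
      · rfl
      · exact absurd ((vc_cond_iff_mem x (hdom x hxmem)).1 h) hxnot
    have hlt : e.toList.countP vcCond < e.toList.length := by
      refine lt_of_le_of_ne List.countP_le_length (fun h => ?_)
      have := (List.countP_eq_length).1 h x hxmem
      rw [hcond] at this
      cases this
    simp only [ite_eq_right_iff]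
    intro h
    have : e.toList.countP vcCond = e.toList.length := by exact_mod_cast h
    omega
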